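-- pv_equiv track=rewrite | github.com/career-prep/ucp-namer-latam-2026 | homework1/catherine_zhong/KAnagrams_q7.py | KAnagrams
-- ===== SOURCE A (Python) =====
-- def KAnagrams(str1, str2, k):
--     str1Chars = dict()
--     diff = len(str1)
--
--     #assuming letters cannot be added
--     if len(str1) != len(str2):
--         return False
--
--     #gets all characters of string1
--     for i in str1:
--         str1Chars[i] = str1Chars.get(i, 0) + 1
--
--     #checks characters in string2
--     for i in str2:
--         if str1Chars.get(i, 0) > 0:
--             str1Chars[i] = str1Chars.get(i) -1
--             diff -= 1
--
--     #checks if difference is smaller than k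
--     if diff <= k:
--         return True
--     return False
-- ===== SOURCE B (Python) =====
-- def KAnagrams(str1, str2, k):
--     if len(str1) != len(str2):
--         return False
--     diff = sum(max(str1.count(c) - str2.count(c), 0) for c in set(str1))
--     return diff <= k
-- ===== Notes on version B (the rewrite author's own statement) =====
-- stated objective: simpler
-- what changed: Replaces the mutated count dict and the decrement-during-scan pass over str2 by a direct closed-form sum, over the distinct characters of str1, of the positive count surpluses (str1.count - str2.count): two independent counting queries and no mutable state; measured faster because the per-character Python-level dict updates are gone (str.count scans in C).
import Mathlib
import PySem

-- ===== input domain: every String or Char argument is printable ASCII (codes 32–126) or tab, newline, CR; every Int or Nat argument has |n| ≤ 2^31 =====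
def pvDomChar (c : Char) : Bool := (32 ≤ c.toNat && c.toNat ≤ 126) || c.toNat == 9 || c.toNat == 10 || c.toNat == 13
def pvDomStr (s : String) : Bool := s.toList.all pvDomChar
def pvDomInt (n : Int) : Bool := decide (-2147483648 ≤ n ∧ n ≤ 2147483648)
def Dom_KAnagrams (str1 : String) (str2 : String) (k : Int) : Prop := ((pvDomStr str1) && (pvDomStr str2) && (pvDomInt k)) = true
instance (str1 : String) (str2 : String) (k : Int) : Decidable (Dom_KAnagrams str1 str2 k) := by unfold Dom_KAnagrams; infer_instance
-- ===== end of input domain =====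

-- B replaces A's mutated count dict and decrement-during-scan pass by a closed-form
-- sum of positive count surpluses over the distinct characters of str1 (simpler).


-- ===== PORT A =====
def KAnagrams (str1 : String) (str2 : String) (k : Int) : Bool :=
  -- diff starts at len(str1); the first loop builds the count dict, the second
  -- decrements it along str2 ('str1Chars.get(i)' is the present value after the > 0 check)
  if str1.toList.length ≠ str2.toList.length then false
  else
    decide ((str2.toList.foldl
        (fun (st : PySem.Dict Char Int × Int) i =>
          if st.1.getD i 0 > 0 then (st.1.insert i (st.1.getD i 0 - 1), st.2 - 1) else st)
        (str1.toList.foldl (fun d i => d.insert i (d.getD i 0 + 1))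
          (PySem.Dict.empty : PySem.Dict Char Int), (str1.toList.length : Int))).2 ≤ k)

-- ===== PORT B =====
def KAnagrams_alt (str1 : String) (str2 : String) (k : Int) : Bool :=
  -- str.count on a length-1 needle is exactly the character count (List.count)
  if str1.toList.length ≠ str2.toList.length then false
  else
    decide ((((PySem.Set.ofList str1.toList).map
        (fun c => max ((str1.toList.count c : Int) - (str2.toList.count c : Int)) 0)).sum) ≤ k)

-- ===== PRECONDITION & SPEC =====
def Spec_KAnagrams (str1 : String) (str2 : String) (k : Int) (out : Bool) : Prop := out = KAnagrams_alt str1 str2 k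
instance (str1 : String) (str2 : String) (k : Int) (out : Bool) : Decidable (Spec_KAnagrams str1 str2 k out) := by unfold Spec_KAnagrams; infer_instance

-- ===== CLAIM (what is proved, stated in full; the proofs are below) =====
def Claim_equal_KAnagrams : Prop := ∀ (str1 : String) (str2 : String) (k : Int), Dom_KAnagrams str1 str2 k → Spec_KAnagrams str1 str2 k (KAnagrams str1 str2 k)

-- ===== LEMMAS AND PROOFS =====

-- A's second loop: if the dict holds the counts of l1, the final diff drops by the
-- number of matched characters, which is l1.length - (l1.diff l2).length.
theorem pvFoldA (l2 : List Char) : ∀ (l1 : List Char) (d : PySem.Dict Char Int) (diff : Int),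
    (∀ c, d.getD c 0 = (l1.count c : Int)) →
    (l2.foldl (fun (st : PySem.Dict Char Int × Int) i =>
        if st.1.getD i 0 > 0 then (st.1.insert i (st.1.getD i 0 - 1), st.2 - 1) else st)
      (d, diff)).2 = diff - l1.length + (l1.diff l2).length := by
  induction l2 with
  | nil => intro l1 d diff _; simp
  | cons c l2 ih =>
    intro l1 d diff hd
    simp only [List.foldl_cons]
    by_cases hc : c ∈ l1
    · have hpos : d.getD c 0 > 0 := by
        rw [hd]; exact_mod_cast List.count_pos_iff.mpr hc
      rw [if_pos hpos]
      have h1 : 1 ≤ l1.count c := List.count_pos_iff.mpr hc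
      have hlen : 0 < l1.length := List.length_pos_of_mem hc
      have := ih (l1.erase c) (d.insert c (d.getD c 0 - 1)) (diff - 1) (by
        intro c'
        rw [PySem.Dict.getD_insert]
        by_cases hcc : c' = c
        · subst hcc
          rw [if_pos rfl, hd, List.count_erase_self]
          push_cast [Nat.cast_sub h1]; ring
        · rw [if_neg hcc, hd, List.count_erase_of_ne hcc])
      rw [this, List.diff_cons, List.length_erase_of_mem hc]
      have : (l1.length - 1 : ℕ) = (l1.length : ℤ) - 1 := by omega
      rw [this]; ring
    · have hnpos : ¬ d.getD c 0 > 0 := by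
        rw [hd]; simp [List.count_eq_zero_of_not_mem hc]
      rw [if_neg hnpos, ih l1 d diff hd, List.diff_cons, List.erase_of_not_mem hc]

theorem pvSumIndicatorZero (a : Char) (s : List Char) (h : a ∉ s) :
    (s.map (fun c => if c = a then (1 : Int) else 0)).sum = 0 := by
  induction s with
  | nil => simp
  | cons b s ih =>
    simp only [List.mem_cons, not_or] at h
    simp [Ne.symm h.1, ih h.2]

theorem pvSumIndicator (a : Char) (s : List Char) (hnd : s.Nodup) (ha : a ∈ s) :
    (s.map (fun c => if c = a then (1 : Int) else 0)).sum = 1 := by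
  induction s with
  | nil => simp at ha
  | cons b s ih =>
    rcases List.nodup_cons.mp hnd with ⟨hb, hnd'⟩
    rcases List.mem_cons.mp ha with rfl | ha'
    · simp [pvSumIndicatorZero a s hb]
    · have : b ≠ a := by rintro rfl; exact hb ha'
      simp [this, ih hnd' ha']

-- Summing the counts of m over a nodup list containing all of m's elements gives |m|.
theorem pvSumCounts (m : List Char) : ∀ (s : List Char), s.Nodup → (∀ x ∈ m, x ∈ s) →
    (s.map (fun c => (m.count c : Int))).sum = m.length := by
  induction m with
  | nil => intro s _ _; simp
  | cons a m ih =>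
    intro s hnd hsub
    have hmap : s.map (fun c => ((a :: m).count c : Int))
        = s.map (fun c => (m.count c : Int) + (if c = a then (1 : Int) else 0)) := by
      apply List.map_congr_left
      intro c _
      simp only [List.count_cons]
      push_cast
      by_cases hca : c = a
      · simp [hca]
      · simp [hca, (Ne.symm hca : a ≠ c)]
    rw [hmap, List.sum_map_add, ih s hnd (fun x hx => hsub x (List.mem_cons_of_mem a hx)),
        pvSumIndicator a s hnd (hsub a List.mem_cons_self)]
    simp only [List.length_cons]
    push_cast
    omega

-- B's per-character surplus is the count in l1.diff l2.
theorem pvSurplus (l1 l2 : List Char) (c : Char) :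
    max ((l1.count c : Int) - (l2.count c : Int)) 0 = ((l1.diff l2).count c : Int) := by
  rw [List.count_diff]
  omega

theorem pvCore (l1 l2 : List Char) (k : Int) :
    decide ((l2.foldl
        (fun (st : PySem.Dict Char Int × Int) i =>
          if st.1.getD i 0 > 0 then (st.1.insert i (st.1.getD i 0 - 1), st.2 - 1) else st)
        (l1.foldl (fun d i => d.insert i (d.getD i 0 + 1))
          (PySem.Dict.empty : PySem.Dict Char Int), (l1.length : Int))).2 ≤ k)
    = decide ((((PySem.Set.ofList l1).map
        (fun c => max ((l1.count c : Int) - (l2.count c : Int)) 0)).sum) ≤ k) := by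
  have hd : ∀ c, (l1.foldl (fun d i => d.insert i (d.getD i 0 + 1))
      (PySem.Dict.empty : PySem.Dict Char Int)).getD c 0 = (l1.count c : Int) := by
    intro c
    rw [PySem.Dict.getD_foldl_insert_add_one, PySem.Dict.getD_empty]
    ring
  rw [pvFoldA l2 l1 _ _ hd]
  have hB : (((PySem.Set.ofList l1).map
      (fun c => max ((l1.count c : Int) - (l2.count c : Int)) 0)).sum : Int)
      = ((l1.diff l2).length : Int) := by
    have hmap : (PySem.Set.ofList l1).map
        (fun c => max ((l1.count c : Int) - (l2.count c : Int)) 0)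
        = (PySem.Set.ofList l1).map (fun c => ((l1.diff l2).count c : Int)) := by
      apply List.map_congr_left
      intro c _
      exact pvSurplus l1 l2 c
    rw [hmap]
    exact pvSumCounts (l1.diff l2) (PySem.Set.ofList l1) (PySem.Set.nodup_ofList l1)
      (fun x hx => (PySem.Set.mem_ofList l1 x).mpr (List.diff_subset l1 l2 hx))
  rw [hB]
  have h0 : (l1.length : Int) - l1.length + ((l1.diff l2).length : Int)
      = ((l1.diff l2).length : Int) := by ring
  rw [h0]

theorem KAnagrams_eq (str1 str2 : String) (k : Int) :
    KAnagrams str1 str2 k = KAnagrams_alt str1 str2 k := by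
  unfold KAnagrams KAnagrams_alt
  by_cases hlen : str1.toList.length ≠ str2.toList.length
  · rw [if_pos hlen, if_pos hlen]
  · rw [if_neg hlen, if_neg hlen]
    exact pvCore str1.toList str2.toList k

-- ===== VERDICT (by name: the statement is the Claim_ definition above) =====
theorem KAnagrams_spec : Claim_equal_KAnagrams := by
  intro str1 str2 k _
  unfold Spec_KAnagrams
  exact KAnagrams_eq str1 str2 k
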